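-- pv_equiv track=rewrite | github.com/hyperledger-iroha/iroha | scripts/android_parity_metrics.py | _format_labels
-- ===== SOURCE A (Python) =====
-- from typing import Dict, Iterable, List, Mapping, Optional
--
-- def _format_labels(labels: Mapping[str, str]) -> str:
--     def _escape(value: str) -> str:
--         return (
--             value.replace("\\", "\\\\")
--             .replace("\n", "\\n")
--             .replace('"', '\\"')
--         )
--
--     items = [f'{key}="{_escape(str(value))}"' for key, value in labels.items()]
--     return "{" + ",".join(items) + "}"
-- ===== SOURCE B (Python) =====
-- def _format_labels(labels):
--     out = ["{"]
--     first = True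
--     for key, value in labels.items():
--         if first:
--             first = False
--         else:
--             out.append(",")
--         out.append(key)
--         out.append('="')
--         for ch in str(value):
--             if ch == "\\":
--                 out.append("\\\\")
--             elif ch == "\n":
--                 out.append("\\n")
--             elif ch == '"':
--                 out.append('\\"')
--             else:
--                 out.append(ch)
--         out.append('"')
--     out.append("}")
--     return "".join(out)
-- ===== Notes on version B (the rewrite author's own statement) =====
-- stated objective: alternative
-- what changed: B builds the whole output in one left-to-right pass with a single accumulator, escaping each character once in a four-way branch, instead of A's three chained full-string replace scans per value plus an intermediate item list joined at the end.
import Mathlib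
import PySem

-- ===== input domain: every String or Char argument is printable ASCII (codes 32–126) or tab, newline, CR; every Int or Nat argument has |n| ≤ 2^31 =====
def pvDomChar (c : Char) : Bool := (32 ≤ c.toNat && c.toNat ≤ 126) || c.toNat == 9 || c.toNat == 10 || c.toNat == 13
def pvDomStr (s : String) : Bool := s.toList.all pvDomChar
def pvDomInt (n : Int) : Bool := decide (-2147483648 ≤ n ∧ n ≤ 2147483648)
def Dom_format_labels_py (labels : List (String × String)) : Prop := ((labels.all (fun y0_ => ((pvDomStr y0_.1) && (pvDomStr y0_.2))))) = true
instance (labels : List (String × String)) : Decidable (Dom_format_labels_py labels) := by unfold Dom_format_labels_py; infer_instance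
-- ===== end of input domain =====

-- B: one-pass per-character escaping with a single output accumulator instead of A's three chained replace scans and item-list join; alternative structure, same value.
-- ===== PORT A =====
-- _escape: three chained .replace calls (backslash first), via PySem.Chars.replace on code points
def pvEscA (v : List Char) : List Char :=
  PySem.Chars.replace (PySem.Chars.replace (PySem.Chars.replace v ['\\'] ['\\', '\\']) ['\n'] ['\\', 'n']) ['"'] ['\\', '"']

def format_labels_py (labels : List (String × String)) : String :=
  -- items = [f'{key}="{_escape(str(value))}"' for key, value in labels.items()]
  let items := labels.map (fun kv => kv.1.toList ++ '=' :: '"' :: (pvEscA kv.2.toList ++ ['"']))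
  -- "{" + ",".join(items) + "}"
  String.ofList ('{' :: (PySem.Chars.join [','] items ++ ['}']))

-- ===== PORT B =====
-- the four-way branch of B's inner character loop
def pvEscChar (c : Char) : List Char :=
  if c = '\\' then ['\\', '\\']
  else if c = '\n' then ['\\', 'n']
  else if c = '"' then ['\\', '"']
  else [c]

-- one step of B's outer loop: state = (first, accumulated output pieces, flattened)
def pvEmitB (st : Bool × List Char) (kv : String × String) : Bool × List Char :=
  (false,
    st.2 ++ (if st.1 then [] else [',']) ++ kv.1.toList ++ ['=', '"']
         ++ kv.2.toList.flatMap pvEscChar ++ ['"'])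

def format_labels_py_alt (labels : List (String × String)) : String :=
  let st := labels.foldl pvEmitB (true, ['{'])
  String.ofList (st.2 ++ ['}'])

-- ===== PRECONDITION & SPEC =====
def Spec_format_labels_py (labels : List (String × String)) (out : String) : Prop := out = format_labels_py_alt labels
instance (labels : List (String × String)) (out : String) : Decidable (Spec_format_labels_py labels out) := by unfold Spec_format_labels_py; infer_instance

-- ===== CLAIM (what is proved, stated in full; the proofs are below) =====
def Claim_equal_format_labels_py : Prop := ∀ (labels : List (String × String)), Dom_format_labels_py labels → Spec_format_labels_py labels (format_labels_py labels)

-- ===== LEMMAS AND PROOFS =====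

-- ===== VERDICT (by name: the statement is the Claim_ definition above) =====
-- per-pair rendered piece (shared shape of both sides)
def pvPart (kv : String × String) : List Char :=
  kv.1.toList ++ '=' :: '"' :: (kv.2.toList.flatMap pvEscChar ++ ['"'])

theorem replace_go_single (a : Char) (ns : List Char) (l : List Char) : ∀ acc,
    PySem.Chars.replace.go [a] ns l.length l acc
      = acc.reverse ++ l.flatMap (fun c => if c = a then ns else [c]) := by
  induction l with
  | nil => intro acc; simp [PySem.Chars.replace.go]
  | cons c t ih =>
      intro acc
      show PySem.Chars.replace.go [a] ns (t.length + 1) (c :: t) acc = _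
      rw [PySem.Chars.replace.go]
      by_cases h : c = a
      · subst h; simp [List.isPrefixOf, ih]
      · simp [List.isPrefixOf, h, ih, Ne.symm h]

theorem replace_single (a : Char) (ns : List Char) (l : List Char) :
    PySem.Chars.replace l [a] ns = l.flatMap (fun c => if c = a then ns else [c]) := by
  rw [PySem.Chars.replace]
  simp [replace_go_single]

theorem escA_flatMap (v : List Char) : pvEscA v = v.flatMap pvEscChar := by
  unfold pvEscA
  rw [replace_single, replace_single, replace_single]
  induction v with
  | nil => rfl
  | cons c t ih =>
      simp only [List.flatMap_cons, List.flatMap_append, ih]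
      congr 1
      by_cases h1 : c = '\\'
      · subst h1; rfl
      · by_cases h2 : c = '\n'
        · subst h2; rfl
        · by_cases h3 : c = '"'
          · subst h3; rfl
          · simp [pvEscChar, h1, h2, h3]

theorem emitB_inv (labels : List (String × String)) : ∀ acc : List Char,
    (labels.foldl pvEmitB (false, acc)).2
      = acc ++ labels.flatMap (fun kv => ',' :: pvPart kv) := by
  induction labels with
  | nil => intro acc; simp
  | cons kv rest ih =>
      intro acc
      simp only [List.foldl_cons, List.flatMap_cons, pvEmitB, ih, pvPart]
      simp

theorem join_cons_flat (p : List Char) (ps : List (List Char)) :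
    PySem.Chars.join [','] (p :: ps) = p ++ ps.flatMap (fun q => ',' :: q) := by
  induction ps generalizing p with
  | nil => simp [PySem.Chars.join_singleton]
  | cons q qs ih => rw [PySem.Chars.join_cons_cons, ih q]; simp

theorem format_labels_py_spec : Claim_equal_format_labels_py := by
  intro labels _
  show format_labels_py labels = format_labels_py_alt labels
  cases labels with
  | nil => rfl
  | cons kv rest =>
      simp only [format_labels_py, format_labels_py_alt, List.map_cons, List.foldl_cons]
      rw [show (pvEmitB (true, ['{']) kv) = (false, '{' :: pvPart kv) from by
        simp [pvEmitB, pvPart]]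
      rw [emitB_inv]
      congr 1
      simp only [escA_flatMap]
      rw [join_cons_flat]
      simp [pvPart, List.flatMap_map]
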